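-- pv_equiv track=rewrite | github.com/AlazarGebre21/leetcode-Solutions | 2639-separate-the-digits-in-an-array/separate-the-digits-in-an-array.py | separateDigits
-- ===== SOURCE A (Python) =====
-- from typing import List
--
-- def separateDigits(nums: List[int]) -> List[int]:
--     answers = []
--     str1 = ''
--     for i in range(len(nums)):
--         str1 += str(nums[i])
--     for i in range(len(str1)):
--         answers.append(int(str1[i]))
--     return answers
-- ===== SOURCE B (Python) =====
-- from typing import List
--
-- def separateDigits(nums: List[int]) -> List[int]:
--     answers = []
--     for num in nums:
--         if num == 0:
--             answers.append(0)
--         else: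
--             digits = []
--             while num > 0:
--                 digits.append(num % 10)
--                 num //= 10
--             answers.extend(reversed(digits))
--     return answers
-- ===== Notes on version B (the rewrite author's own statement) =====
-- stated objective: alternative
-- what changed: B extracts each number's digits arithmetically (mod/floordiv loop per number, reversed) instead of concatenating all numbers into one string and re-parsing every character with int().
import Mathlib
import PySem

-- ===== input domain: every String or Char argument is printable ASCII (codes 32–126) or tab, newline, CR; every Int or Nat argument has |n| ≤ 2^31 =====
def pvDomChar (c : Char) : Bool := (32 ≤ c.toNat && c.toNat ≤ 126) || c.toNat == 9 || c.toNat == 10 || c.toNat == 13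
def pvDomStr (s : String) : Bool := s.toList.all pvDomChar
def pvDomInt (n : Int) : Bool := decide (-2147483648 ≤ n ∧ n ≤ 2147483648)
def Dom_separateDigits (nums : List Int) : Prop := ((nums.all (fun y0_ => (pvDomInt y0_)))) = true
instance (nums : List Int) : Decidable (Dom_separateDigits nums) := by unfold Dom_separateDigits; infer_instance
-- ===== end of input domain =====

-- B separates digits arithmetically per number (mod/floordiv) instead of A's build-one-big-string-and-reparse; same cost, no strings.

-- ===== PORT A =====
-- str1 += str(nums[i]) over range(len(nums)); then int(str1[i]) per char; iteration by index
-- ported as a fold over the same char sequence. int('-') would be a ValueError (none); those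
-- inputs are excluded by Pre_, .getD 0 is never taken there.
def separateDigits (nums : List Int) : List Int :=
  (nums.foldl (fun s n => s ++ PySem.Int.toStr n) "").toList.foldl
    (fun answers c => answers ++ [(PySem.Int.ofChars? [c]).getD 0]) []

-- ===== PORT B =====
-- while num > 0: digits.append(num % 10); num //= 10   (digits collected least-significant first)
def pvDigitsRev (num : Int) : List Int :=
  if _h : 0 < num then
    PySem.Int.mod num 10 :: pvDigitsRev (PySem.Int.floordiv num 10)
  else []
termination_by num.toNat
decreasing_by
  rw [PySem.Int.floordiv_eq_ediv_of_pos (by norm_num)]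
  omega

def separateDigits_alt (nums : List Int) : List Int :=
  nums.foldl (fun answers num =>
    if num == 0 then answers ++ [0]
    else answers ++ (pvDigitsRev num).reverse) []

-- ===== PRECONDITION & SPEC =====
-- Pre_ excludes lists containing a negative number: there A raises ValueError (int('-')).
def Pre_separateDigits (nums : List Int) : Prop := ∀ n ∈ nums, 0 ≤ n
instance (nums : List Int) : Decidable (Pre_separateDigits nums) := by unfold Pre_separateDigits; infer_instance
def pvWitness_separateDigits : List Int := [12, 0, 305]

def Spec_separateDigits (nums : List Int) (out : List Int) : Prop := out = separateDigits_alt nums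
instance (nums : List Int) (out : List Int) : Decidable (Spec_separateDigits nums out) := by unfold Spec_separateDigits; infer_instance

-- ===== CLAIM (what is proved, stated in full; the proofs are below) =====
def Claim_equal_separateDigits : Prop := ∀ (nums : List Int), Dom_separateDigits nums → Pre_separateDigits nums → Spec_separateDigits nums (separateDigits nums)

-- ===== LEMMAS AND PROOFS =====

-- per-char parse: int(str(d-digit)) = d
lemma pv_f_digitChar (d : Nat) (hd : d < 10) :
    (PySem.Int.ofChars? [Nat.digitChar d]).getD 0 = (d : Int) := by
  interval_cases d <;> decide

-- toDigitsCore accumulator lemma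
lemma pv_toDigitsCore_append (b : Nat) : ∀ (f n : Nat) (l : List Char),
    Nat.toDigitsCore b f n l = Nat.toDigitsCore b f n [] ++ l := by
  intro f
  induction f with
  | zero => intro n l; simp [Nat.toDigitsCore]
  | succ f ih =>
    intro n l
    simp only [Nat.toDigitsCore]
    split
    · rfl
    · rw [ih (n / b) (Nat.digitChar (n % b) :: l), ih (n / b) [Nat.digitChar (n % b)]]
      simp

-- fuel independence for sufficient fuel
lemma pv_toDigitsCore_fuel : ∀ (n f₁ f₂ : Nat), n < f₁ → n < f₂ →
    Nat.toDigitsCore 10 f₁ n [] = Nat.toDigitsCore 10 f₂ n [] := by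
  intro n
  induction n using Nat.strong_induction_on with
  | _ n ih =>
    intro f₁ f₂ h1 h2
    match f₁, f₂ with
    | f₁ + 1, f₂ + 1 =>
      simp only [Nat.toDigitsCore]
      split
      · rfl
      · rename_i hdiv
        rw [pv_toDigitsCore_append 10 f₁, pv_toDigitsCore_append 10 f₂]
        have hn10 : 10 ≤ n := by
          by_contra h
          exact hdiv (Nat.div_eq_of_lt (by omega))
        have hlt : n / 10 < n := Nat.div_lt_self (by omega) (by omega)
        rw [ih (n / 10) hlt f₁ f₂ (by omega) (by omega)]

lemma pv_toDigits_small (n : Nat) (h : n < 10) :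
    Nat.toDigits 10 n = [Nat.digitChar n] := by
  simp [Nat.toDigits, Nat.toDigitsCore, Nat.div_eq_of_lt h, Nat.mod_eq_of_lt h]

lemma pv_toDigits_rec (n : Nat) (h : 10 ≤ n) :
    Nat.toDigits 10 n = Nat.toDigits 10 (n / 10) ++ [Nat.digitChar (n % 10)] := by
  unfold Nat.toDigits
  have hdiv : n / 10 ≠ 0 := by
    intro h0; omega
  conv_lhs => rw [show n + 1 = (n) + 1 from rfl]
  simp only [Nat.toDigitsCore]
  rw [if_neg hdiv, pv_toDigitsCore_append 10 n]
  congr 1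
  exact pv_toDigitsCore_fuel (n / 10) n (n / 10 + 1)
    (by have := Nat.div_lt_self (by omega : 0 < n) (by omega : 1 < 10); omega) (by omega)

lemma pv_digitsRev_natCast (m : Nat) :
    pvDigitsRev (m : Int) = if m = 0 then [] else ((m % 10 : Nat) : Int) :: pvDigitsRev ((m / 10 : Nat) : Int) := by
  by_cases hm : m = 0
  · subst hm; rw [pvDigitsRev]; simp
  · rw [pvDigitsRev, dif_pos (by exact_mod_cast Nat.pos_of_ne_zero hm), if_neg hm]
    have h1 : PySem.Int.mod (m : Int) 10 = ((m % 10 : Nat) : Int) := by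
      exact_mod_cast PySem.Int.mod_natCast m 10
    have h2 : PySem.Int.floordiv (m : Int) 10 = ((m / 10 : Nat) : Int) := by
      exact_mod_cast PySem.Int.floordiv_natCast m 10
    rw [h1, h2]

-- per-number correspondence: A's parse of str(m) equals B's reversed mod/div digits
lemma pv_one_number (m : Nat) :
    (Nat.toDigits 10 m).map (fun c => (PySem.Int.ofChars? [c]).getD 0)
      = if m = 0 then [0] else (pvDigitsRev (m : Int)).reverse := by
  induction m using Nat.strong_induction_on with
  | _ m ih =>
    by_cases hm : m = 0
    · subst hm; decide
    · rw [if_neg hm]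
      by_cases hsmall : m < 10
      · rw [pv_toDigits_small m hsmall]
        rw [pv_digitsRev_natCast m, if_neg hm, pv_digitsRev_natCast (m / 10),
          if_pos (Nat.div_eq_of_lt hsmall), Nat.mod_eq_of_lt hsmall]
        simp [pv_f_digitChar m hsmall]
      · have h10 : 10 ≤ m := by omega
        rw [pv_toDigits_rec m h10, List.map_append,
          ih (m / 10) (Nat.div_lt_self (by omega) (by omega))]
        rw [if_neg (by omega : ¬ m / 10 = 0)]
        rw [pv_digitsRev_natCast m, if_neg hm, List.reverse_cons]
        simp [pv_f_digitChar (m % 10) (Nat.mod_lt m (by omega))]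

-- A's string concatenation, as a char list
lemma pv_str1_toList (nums : List Int) :
    (nums.foldl (fun s n => s ++ PySem.Int.toStr n) "").toList
      = nums.flatMap (fun n => PySem.Int.toChars n) := by
  suffices h : ∀ (s : String), (nums.foldl (fun s n => s ++ PySem.Int.toStr n) s).toList
      = s.toList ++ nums.flatMap (fun n => PySem.Int.toChars n) by
    simpa using h ""
  induction nums with
  | nil => intro s; simp
  | cons n ns ih =>
    intro s
    simp only [List.foldl_cons, List.flatMap_cons, ih]
    simp [PySem.Int.toList_toStr]

-- A's second fold is a map
lemma pv_fold_map (cs : List Char) :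
    cs.foldl (fun answers c => answers ++ [(PySem.Int.ofChars? [c]).getD 0]) []
      = cs.map (fun c => (PySem.Int.ofChars? [c]).getD 0) := by
  suffices h : ∀ (acc : List Int), cs.foldl (fun answers c => answers ++ [(PySem.Int.ofChars? [c]).getD 0]) acc
      = acc ++ cs.map (fun c => (PySem.Int.ofChars? [c]).getD 0) by
    simpa using h []
  induction cs with
  | nil => intro acc; simp
  | cons c cs ih => intro acc; simp [ih]

-- B's fold is a flatMap
lemma pv_alt_flatMap (nums : List Int) :
    separateDigits_alt nums
      = nums.flatMap (fun num => if num == 0 then [0] else (pvDigitsRev num).reverse) := by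
  unfold separateDigits_alt
  suffices h : ∀ (acc : List Int), nums.foldl (fun answers num =>
      if num == 0 then answers ++ [0] else answers ++ (pvDigitsRev num).reverse) acc
      = acc ++ nums.flatMap (fun num => if num == 0 then [0] else (pvDigitsRev num).reverse) by
    simpa using h []
  induction nums with
  | nil => intro acc; simp
  | cons n ns ih =>
    intro acc
    simp only [List.foldl_cons, List.flatMap_cons, ih]
    by_cases hn : n = 0 <;> simp [hn]

-- ===== VERDICT (by name: the statement is the Claim_ definition above) =====
theorem separateDigits_spec : Claim_equal_separateDigits := by
  intro nums hdom hpre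
  unfold Spec_separateDigits separateDigits
  rw [pv_str1_toList, pv_fold_map, pv_alt_flatMap, List.map_flatMap]
  induction nums with
  | nil => rfl
  | cons n ns ih =>
    have hn : 0 ≤ n := hpre n (by simp)
    simp only [List.flatMap_cons]
    congr 1
    · have : PySem.Int.toChars n = Nat.toDigits 10 n.toNat := by
        simp [PySem.Int.toChars, not_lt.mpr hn]
      rw [this, pv_one_number]
      have : (n.toNat : Int) = n := Int.toNat_of_nonneg hn
      by_cases h0 : n = 0
      · simp [h0]
      · rw [if_neg (by omega), if_neg (by simpa using h0)]
        rw [this]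
    · exact ih (by simp only [Dom_separateDigits, List.all_cons, Bool.and_eq_true] at hdom ⊢; exact hdom.2)
        (fun x hx => hpre x (List.mem_cons_of_mem _ hx))
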